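-- pv_equiv track=rewrite | github.com/alwinm/mpilabel | v2.py | merge_tuples_unionfind
-- ===== SOURCE A (Python) =====
-- def merge_tuples_unionfind(tuples):
--     '''
--     Classic algorithms union find with path compression
--     https://en.wikipedia.org/wiki/Disjoint-set_data_structure
--
--     tuples : a list of pairs of indices
--
--     Returns
--     parent_dict : dictionary[index] = parent index
--     '''
--     parent_dict = {}
--
--     def subfind(x):
--         # update roots while visiting parents
--         if parent_dict[x] != x:
--             # update parent of x by finding parent of parent
--             # until the progenitor is reached parent_dict[progenitor] = progenitor
--             parent_dict[x] = subfind(parent_dict[x])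
--         return parent_dict[x]
--
--     def find(x):
--         if x not in parent_dict:
--             # x forms new set and becomes a root
--             parent_dict[x] = x
--             return x
--         if parent_dict[x] != x:
--             # follow chain of parents of parents to find root
--             parent_dict[x] = subfind(parent_dict[x])
--         return parent_dict[x]
--
--     # each tuple represents a connection between two items
--     # so merge them by setting root to be the lower root.
--     for p0,p1 in list(tuples):
--         r0 = find(p0)
--         r1 = find(p1)
--         if r0 < r1:
--             parent_dict[r1] = r0
--         elif r1 < r0:
--             parent_dict[r0] = r1
--
--     # final cleanup
--     for key in parent_dict:
--         find(key)
--
--     return parent_dict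
-- ===== SOURCE B (Python) =====
-- def merge_tuples_unionfind(tuples):
--     # Flat component-label dict: each seen index maps directly to the minimum
--     # index of its component; merging relabels the larger-rooted component.
--     lab = {}
--     for a, b in list(tuples):
--         for x in (a, b):
--             if x not in lab:
--                 lab[x] = x
--         la, lb = lab[a], lab[b]
--         lo, hi = (la, lb) if la < lb else (lb, la)
--         if lo != hi:
--             for x in lab:
--                 if lab[x] == hi:
--                     lab[x] = lo
--     return lab
-- ===== Notes on version B (the rewrite author's own statement) =====
-- stated objective: simpler
-- what changed: Replaces the union-find forest (parent pointers, recursive find with path compression, final cleanup pass) by a single flat label dict mapping every seen index directly to its component minimum, merging two components by relabelling in one scan.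
import Mathlib
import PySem

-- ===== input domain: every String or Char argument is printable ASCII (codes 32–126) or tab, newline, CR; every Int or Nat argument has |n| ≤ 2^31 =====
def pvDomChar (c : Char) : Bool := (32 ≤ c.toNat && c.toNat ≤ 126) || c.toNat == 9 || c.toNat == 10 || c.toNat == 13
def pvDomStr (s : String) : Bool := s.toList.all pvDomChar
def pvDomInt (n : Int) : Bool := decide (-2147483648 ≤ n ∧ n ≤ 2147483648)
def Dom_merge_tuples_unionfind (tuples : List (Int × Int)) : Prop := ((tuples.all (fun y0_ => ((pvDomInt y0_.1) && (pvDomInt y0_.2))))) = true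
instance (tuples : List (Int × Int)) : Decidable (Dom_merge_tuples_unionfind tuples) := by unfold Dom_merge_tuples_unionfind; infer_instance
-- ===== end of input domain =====

-- B replaces A's union-find forest by a flat component-minimum label dict (simpler; not faster).

-- ===== PORT A =====
-- subfind(x): follow/compress the parent chain.  Python's recursion carries no fuel; since
-- parent chains strictly decrease, recursion depth is < dict size, so fuel = size (passed at
-- the call site in pvFind) is never exhausted on reachable states; the fuel-0 branch is dead.
-- parent_dict[x] (a KeyError if x were absent, which never happens on reachable states) is
-- rendered total as getD x x.
def pvSubfind : Nat → PySem.Dict Int Int → Int → PySem.Dict Int Int × Int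
  | 0, P, x => (P, x)
  | f+1, P, x =>
    if P.getD x x ≠ x then
      let s := pvSubfind f P (P.getD x x)
      (s.1.insert x s.2, s.2)   -- parent_dict[x] = subfind(parent_dict[x]); return parent_dict[x]
    else (P, P.getD x x)

def pvFind (P : PySem.Dict Int Int) (x : Int) : PySem.Dict Int Int × Int :=
  if P.contains x = false then (P.insert x x, x)
  else if P.getD x x ≠ x then
    let s := pvSubfind P.size P (P.getD x x)
    (s.1.insert x s.2, s.2)
  else (P, P.getD x x)

def pvStepA (P : PySem.Dict Int Int) (t : Int × Int) : PySem.Dict Int Int :=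
  let f0 := pvFind P t.1
  let f1 := pvFind f0.1 t.2
  if f0.2 < f1.2 then f1.1.insert f1.2 f0.2
  else if f1.2 < f0.2 then f1.1.insert f0.2 f1.2
  else f1.1

def merge_tuples_unionfind (tuples : List (Int × Int)) : List (Int × Int) :=
  let P := tuples.foldl pvStepA PySem.Dict.empty
  -- final cleanup: for key in parent_dict: find(key)  (key set is fixed during this loop)
  (P.keys.foldl (fun Q k => (pvFind Q k).1) P).items

-- ===== PORT B =====
-- for x in lab: if lab[x] == hi: lab[x] = lo   — overwrites values in place, keys unchanged
def pvRelabel (L : PySem.Dict Int Int) (hi lo : Int) : PySem.Dict Int Int :=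
  PySem.Dict.mk (L.items.map (fun q => (q.1, if q.2 = hi then lo else q.2)))

def pvStepB (L : PySem.Dict Int Int) (t : Int × Int) : PySem.Dict Int Int :=
  let L1 := if L.contains t.1 then L else L.insert t.1 t.1
  let L2 := if L1.contains t.2 then L1 else L1.insert t.2 t.2
  let la := L2.getD t.1 t.1
  let lb := L2.getD t.2 t.2
  let lo := if la < lb then la else lb
  let hi := if la < lb then lb else la
  if lo ≠ hi then pvRelabel L2 hi lo else L2

def merge_tuples_unionfind_alt (tuples : List (Int × Int)) : List (Int × Int) :=
  (tuples.foldl pvStepB PySem.Dict.empty).items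

-- ===== PRECONDITION & SPEC =====
def Spec_merge_tuples_unionfind (tuples : List (Int × Int)) (out : List (Int × Int)) : Prop := out = merge_tuples_unionfind_alt tuples
instance (tuples : List (Int × Int)) (out : List (Int × Int)) : Decidable (Spec_merge_tuples_unionfind tuples out) := by unfold Spec_merge_tuples_unionfind; infer_instance

-- ===== CLAIM (what is proved, stated in full; the proofs are below) =====
def Claim_equal_merge_tuples_unionfind : Prop := ∀ (tuples : List (Int × Int)), Dom_merge_tuples_unionfind tuples → Spec_merge_tuples_unionfind tuples (merge_tuples_unionfind tuples)

-- ===== LEMMAS AND PROOFS =====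

-- pure (non-compressing) root chase, with fuel
def pvRootN : Nat → PySem.Dict Int Int → Int → Int
  | 0, _, x => x
  | f+1, P, x => if P.getD x x = x then x else pvRootN f P (P.getD x x)

def pvRoot (P : PySem.Dict Int Int) (x : Int) : Int := pvRootN (P.size + 1) P x

-- invariant: every stored parent is ≤ its child and is itself a key
def pvDec (P : PySem.Dict Int Int) : Prop := ∀ p ∈ P.items, p.2 ≤ p.1 ∧ P.contains p.2 = true

-- measure: number of keys strictly below x
def pvM (P : PySem.Dict Int Int) (x : Int) : Nat := P.keys.countP (fun k => decide (k < x))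

theorem pvGet?_of_getD_ne (P : PySem.Dict Int Int) {x : Int} (hx : P.getD x x ≠ x) :
    P.get? x = some (P.getD x x) := by
  rcases hq : P.get? x with _ | v
  · exfalso; apply hx; rw [PySem.Dict.getD_eq_get?_getD, hq]; rfl
  · rw [PySem.Dict.getD_eq_get?_getD, hq]; rfl

theorem pvContains_congr {L P : PySem.Dict Int Int} (hK : L.keys = P.keys) (z : Int) :
    L.contains z = P.contains z := by
  rw [PySem.Dict.contains_eq_decide_mem_keys, PySem.Dict.contains_eq_decide_mem_keys, hK]

theorem pvM_le (P : PySem.Dict Int Int) (x : Int) : pvM P x ≤ P.size := by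
  have h : P.keys.length = P.size := by
    simp [PySem.Dict.keys, PySem.Dict.size]
  calc pvM P x ≤ P.keys.length := List.countP_le_length
  _ = P.size := h

theorem pvCountSplit (l : List Int) (px x : Int) (h : px < x) :
    l.countP (fun k => decide (k < px)) + l.countP (fun k => decide (px ≤ k) && decide (k < x))
      = l.countP (fun k => decide (k < x)) := by
  induction l with
  | nil => simp
  | cons a l ih =>
    simp only [List.countP_cons]
    by_cases h1 : a < px <;> by_cases h2 : a < x <;> by_cases h3 : px ≤ a <;>
      simp [h1, h2, h3] <;> omega

theorem pvM_lt (P : PySem.Dict Int Int) {z pz : Int} (hD : pvDec P)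
    (h : P.get? z = some pz) (hne : pz ≠ z) :
    pz < z ∧ P.contains pz = true ∧ pvM P pz < pvM P z := by
  have hmem := PySem.Dict.mem_items_of_get?_eq_some P h
  obtain ⟨hle, hc⟩ := hD _ hmem
  have hlt : pz < z := lt_of_le_of_ne hle hne
  refine ⟨hlt, hc, ?_⟩
  have hk : pz ∈ P.keys := (PySem.Dict.contains_iff_mem_keys P pz).mp hc
  have hpos : 0 < P.keys.countP (fun k => decide (pz ≤ k) && decide (k < z)) := by
    rw [List.countP_pos_iff]
    exact ⟨pz, hk, by simp [hlt]⟩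
  have hsplit := pvCountSplit P.keys pz z hlt
  unfold pvM
  omega

theorem pvRootN_fuel (P : PySem.Dict Int Int) (hD : pvDec P) :
    ∀ f g x, pvM P x < f → pvM P x < g → pvRootN f P x = pvRootN g P x := by
  intro f
  induction f with
  | zero => intro g x hf _; omega
  | succ f ih =>
    intro g x hf hg
    cases g with
    | zero => omega
    | succ g =>
      simp only [pvRootN]
      by_cases hx : P.getD x x = x
      · simp [hx]
      · simp only [hx, ite_false]
        obtain ⟨_, _, hm⟩ := pvM_lt P hD (pvGet?_of_getD_ne P hx) hx
        exact ih g (P.getD x x) (by omega) (by omega)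

theorem pvRoot_fix {P : PySem.Dict Int Int} {x : Int} (hx : P.getD x x = x) : pvRoot P x = x := by
  simp [pvRoot, pvRootN, hx]

theorem pvRoot_step (P : PySem.Dict Int Int) {x : Int} (hD : pvDec P)
    (hx : P.getD x x ≠ x) : pvRoot P x = pvRoot P (P.getD x x) := by
  obtain ⟨_, _, hm⟩ := pvM_lt P hD (pvGet?_of_getD_ne P hx) hx
  have hle := pvM_le P x
  have h1 : pvRoot P x = pvRootN P.size P (P.getD x x) := by
    simp [pvRoot, pvRootN, hx]
  rw [h1]
  exact pvRootN_fuel P hD P.size (P.size + 1) (P.getD x x) (by omega) (by omega)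

theorem pvRoot_ind (P : PySem.Dict Int Int) (hD : pvDec P) (motive : Int → Prop)
    (base : ∀ x, P.getD x x = x → motive x)
    (step : ∀ x, P.getD x x ≠ x → motive (P.getD x x) → motive x) :
    ∀ x, motive x := by
  have main : ∀ n x, pvM P x ≤ n → motive x := by
    intro n
    induction n with
    | zero =>
      intro x hx
      by_cases h : P.getD x x = x
      · exact base x h
      · obtain ⟨_, _, hm⟩ := pvM_lt P hD (pvGet?_of_getD_ne P h) h; omega
    | succ n ih =>
      intro x hx
      by_cases h : P.getD x x = x
      · exact base x h
      · obtain ⟨_, _, hm⟩ := pvM_lt P hD (pvGet?_of_getD_ne P h) h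
        exact step x h (ih _ (by omega))
  exact fun x => main (pvM P x) x le_rfl

theorem pvRoot_spec (P : PySem.Dict Int Int) (hD : pvDec P) :
    ∀ x, P.getD (pvRoot P x) (pvRoot P x) = pvRoot P x ∧ pvRoot P x ≤ x ∧
      (P.contains x = true → P.contains (pvRoot P x) = true) := by
  refine pvRoot_ind P hD _ ?_ ?_
  · intro x hx
    rw [pvRoot_fix hx]
    exact ⟨hx, le_refl _, fun h => h⟩
  · intro x hx ih
    rw [pvRoot_step P hD hx]
    obtain ⟨hlt, hc, _⟩ := pvM_lt P hD (pvGet?_of_getD_ne P hx) hx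
    exact ⟨ih.1, le_trans ih.2.1 (le_of_lt hlt), fun _ => ih.2.2 hc⟩

theorem pvDec_insert (P : PySem.Dict Int Int) (hD : pvDec P) {x v : Int}
    (hvx : v ≤ x) (hvc : (P.insert x v).contains v = true) : pvDec (P.insert x v) := by
  intro p hp
  rcases (PySem.Dict.mem_items_insert P x v p).mp hp with h | ⟨hmem, hne⟩
  · rw [h]; exact ⟨hvx, hvc⟩
  · obtain ⟨hle, hc⟩ := hD p hmem
    refine ⟨hle, ?_⟩
    rw [PySem.Dict.contains_insert]
    simp [hc]

theorem pvFresh_root (P : PySem.Dict Int Int) (hD : pvDec P) {x : Int}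
    (hx : P.contains x = false) :
    ∀ z, pvRoot (P.insert x x) z = pvRoot P z := by
  have hDQ : pvDec (P.insert x x) :=
    pvDec_insert P hD le_rfl (by rw [PySem.Dict.contains_insert]; simp)
  refine pvRoot_ind (P.insert x x) hDQ _ ?_ ?_
  · intro z hz
    rw [pvRoot_fix hz]
    by_cases hzx : z = x
    · subst hzx
      rw [pvRoot_fix (PySem.Dict.getD_of_not_contains P z hx)]
    · rw [PySem.Dict.getD_insert] at hz
      simp only [hzx, if_false] at hz
      rw [pvRoot_fix hz]
  · intro z hz ih
    rw [pvRoot_step _ hDQ hz]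
    by_cases hzx : z = x
    · exfalso
      apply hz
      subst hzx
      rw [PySem.Dict.getD_insert]
      simp
    · have hgz : (P.insert x x).getD z z = P.getD z z := by
        rw [PySem.Dict.getD_insert]; simp [hzx]
      rw [hgz] at ih hz ⊢
      rw [ih, ← pvRoot_step P hD hz]

theorem pvComp_root (P : PySem.Dict Int Int) (hD : pvDec P) {x : Int}
    (hx : P.contains x = true) :
    ∀ z, pvRoot (P.insert x (pvRoot P x)) z = pvRoot P z := by
  have hspec := pvRoot_spec P hD x
  have hDQ : pvDec (P.insert x (pvRoot P x)) :=
    pvDec_insert P hD hspec.2.1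
      (by rw [PySem.Dict.contains_insert]; simp [hspec.2.2 hx])
  refine pvRoot_ind _ hDQ _ ?_ ?_
  · intro z hz
    rw [pvRoot_fix hz]
    by_cases hzx : z = x
    · subst hzx
      have hrx : pvRoot P z = z := by
        rw [PySem.Dict.getD_insert] at hz; simpa using hz
      exact hrx.symm
    · rw [PySem.Dict.getD_insert] at hz
      simp only [hzx, if_false] at hz
      rw [pvRoot_fix hz]
  · intro z hz ih
    rw [pvRoot_step _ hDQ hz]
    by_cases hzx : z = x
    · subst hzx
      have hgx : (P.insert z (pvRoot P z)).getD z z = pvRoot P z := by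
        rw [PySem.Dict.getD_insert]; simp
      rw [hgx] at ih ⊢
      rw [ih, pvRoot_fix hspec.1]
    · have hgz : (P.insert x (pvRoot P x)).getD z z = P.getD z z := by
        rw [PySem.Dict.getD_insert]; simp [hzx]
      rw [hgz] at ih hz ⊢
      rw [ih, ← pvRoot_step P hD hz]

theorem pvLink_root (P : PySem.Dict Int Int) (hD : pvDec P) {r0 r1 : Int}
    (h0c : P.contains r0 = true) (h0f : P.getD r0 r0 = r0) (h1f : P.getD r1 r1 = r1)
    (hlt : r0 < r1) :
    ∀ z, pvRoot (P.insert r1 r0) z = if pvRoot P z = r1 then r0 else pvRoot P z := by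
  have hne : r0 ≠ r1 := ne_of_lt hlt
  have hDQ : pvDec (P.insert r1 r0) :=
    pvDec_insert P hD (le_of_lt hlt) (by rw [PySem.Dict.contains_insert]; simp [h0c])
  refine pvRoot_ind _ hDQ _ ?_ ?_
  · intro z hz
    by_cases hz1 : z = r1
    · exfalso
      subst hz1
      rw [PySem.Dict.getD_insert] at hz
      rw [if_pos rfl] at hz
      exact hne hz
    · rw [PySem.Dict.getD_insert] at hz
      simp only [hz1, if_false] at hz
      rw [pvRoot_fix (by rw [PySem.Dict.getD_insert]; simp [hz1, hz]), pvRoot_fix hz]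
      simp [hz1]
  · intro z hz ih
    rw [pvRoot_step _ hDQ hz]
    by_cases hz1 : z = r1
    · subst hz1
      have hg : (P.insert z r0).getD z z = r0 := by
        rw [PySem.Dict.getD_insert]; simp
      rw [hg] at ih ⊢
      rw [ih, pvRoot_fix h0f, pvRoot_fix h1f]
      simp [hne]
    · have hgz : (P.insert r1 r0).getD z z = P.getD z z := by
        rw [PySem.Dict.getD_insert]; simp [hz1]
      rw [hgz] at ih hz ⊢
      rw [ih, ← pvRoot_step P hD hz]

theorem pvCompAssemble (P s1 : PySem.Dict Int Int) (x r : Int) (hdec : pvDec s1)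
    (hkeys : s1.keys = P.keys) (hroot : ∀ z, pvRoot s1 z = pvRoot P z)
    (hold : ∀ z, s1.getD z z = P.getD z z ∨ s1.getD z z = pvRoot P z)
    (hr : r = pvRoot P x) (hcx : P.contains x = true) :
    r = pvRoot P x ∧ (s1.insert x r).keys = P.keys ∧ pvDec (s1.insert x r) ∧
    (∀ z, pvRoot (s1.insert x r) z = pvRoot P z) ∧
    (∀ z, (s1.insert x r).getD z z = P.getD z z ∨ (s1.insert x r).getD z z = pvRoot P z) ∧
    (s1.insert x r).getD x x = pvRoot P x := by
  have hcx1 : s1.contains x = true := by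
    rw [pvContains_congr hkeys]; exact hcx
  have hrs : r = pvRoot s1 x := by rw [hr, hroot x]
  have hspec := pvRoot_spec s1 hdec x
  refine ⟨hr, ?_, ?_, ?_, ?_, ?_⟩
  · rw [PySem.Dict.keys_insert_of_contains s1 r hcx1, hkeys]
  · exact pvDec_insert s1 hdec (hrs ▸ hspec.2.1)
      (by rw [PySem.Dict.contains_insert]; simp [hrs ▸ hspec.2.2 hcx1])
  · intro z
    rw [hrs, pvComp_root s1 hdec hcx1 z, hroot z]
  · intro z
    by_cases hzx : z = x
    · subst hzx
      right
      rw [PySem.Dict.getD_insert]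
      simp [hr]
    · rw [PySem.Dict.getD_insert]
      simp only [hzx, if_false]
      exact hold z
  · rw [PySem.Dict.getD_insert]
    simp [hr]

theorem pvSubfind_spec : ∀ (f : Nat) (P : PySem.Dict Int Int) (x : Int), pvDec P → pvM P x < f →
    (pvSubfind f P x).2 = pvRoot P x ∧
    (pvSubfind f P x).1.keys = P.keys ∧
    pvDec (pvSubfind f P x).1 ∧
    (∀ z, pvRoot (pvSubfind f P x).1 z = pvRoot P z) ∧
    (∀ z, (pvSubfind f P x).1.getD z z = P.getD z z ∨ (pvSubfind f P x).1.getD z z = pvRoot P z) ∧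
    (pvSubfind f P x).1.getD x x = pvRoot P x := by
  intro f
  induction f with
  | zero => intro P x hD hf; omega
  | succ f ih =>
    intro P x hD hf
    by_cases hx : P.getD x x = x
    · have hv : pvSubfind (f + 1) P x = (P, P.getD x x) := by
        simp [pvSubfind, hx]
      rw [hv]
      exact ⟨by rw [hx, pvRoot_fix hx], rfl, hD, fun z => rfl, fun z => Or.inl rfl,
        by rw [hx, pvRoot_fix hx]⟩
    · obtain ⟨hlt, hcp, hm⟩ := pvM_lt P hD (pvGet?_of_getD_ne P hx) hx
      obtain ⟨h2, hkeys, hdec, hroot, hold, _⟩ := ih P (P.getD x x) hD (by omega)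
      have hv : pvSubfind (f + 1) P x =
          ((pvSubfind f P (P.getD x x)).1.insert x (pvSubfind f P (P.getD x x)).2,
            (pvSubfind f P (P.getD x x)).2) := by
        simp [pvSubfind, hx]
      rw [hv]
      have hr : (pvSubfind f P (P.getD x x)).2 = pvRoot P x := by
        rw [h2, ← pvRoot_step P hD hx]
      have hcx : P.contains x = true := by
        rw [PySem.Dict.contains_eq_isSome_get?, pvGet?_of_getD_ne P hx]; rfl
      exact pvCompAssemble P (pvSubfind f P (P.getD x x)).1 x
        (pvSubfind f P (P.getD x x)).2 hdec hkeys hroot hold hr hcx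

theorem pvFind_spec (P : PySem.Dict Int Int) (x : Int) (hD : pvDec P) :
    (pvFind P x).2 = pvRoot P x ∧
    (pvFind P x).1.keys = (if P.contains x = true then P.keys else P.keys ++ [x]) ∧
    pvDec (pvFind P x).1 ∧
    (∀ z, pvRoot (pvFind P x).1 z = pvRoot P z) ∧
    (∀ z, (pvFind P x).1.getD z z = P.getD z z ∨ (pvFind P x).1.getD z z = pvRoot P z) ∧
    (pvFind P x).1.getD x x = pvRoot P x := by
  by_cases hc : P.contains x = true
  · by_cases hx : P.getD x x = x
    · have hv : pvFind P x = (P, P.getD x x) := by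
        unfold pvFind
        rw [if_neg (by simp [hc]), if_neg (by simpa using hx)]
      rw [hv]
      exact ⟨by rw [hx, pvRoot_fix hx], by rw [if_pos hc], hD, fun z => rfl,
        fun z => Or.inl rfl, by rw [hx, pvRoot_fix hx]⟩
    · obtain ⟨hlt, hcp, hm⟩ := pvM_lt P hD (pvGet?_of_getD_ne P hx) hx
      have hfuel : pvM P (P.getD x x) < P.size := lt_of_lt_of_le hm (pvM_le P x)
      obtain ⟨h2, hkeys, hdec, hroot, hold, _⟩ := pvSubfind_spec P.size P (P.getD x x) hD hfuel
      have hv : pvFind P x =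
          ((pvSubfind P.size P (P.getD x x)).1.insert x (pvSubfind P.size P (P.getD x x)).2,
            (pvSubfind P.size P (P.getD x x)).2) := by
        unfold pvFind
        rw [if_neg (by simp [hc]), if_pos hx]
      rw [hv]
      have hr : (pvSubfind P.size P (P.getD x x)).2 = pvRoot P x := by
        rw [h2, ← pvRoot_step P hD hx]
      obtain ⟨c1, c2, c3, c4, c5, c6⟩ := pvCompAssemble P (pvSubfind P.size P (P.getD x x)).1 x
        (pvSubfind P.size P (P.getD x x)).2 hdec hkeys hroot hold hr hc
      exact ⟨c1, by rw [if_pos hc]; exact c2, c3, c4, c5, c6⟩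
  · have hcf : P.contains x = false := by simpa using hc
    have hv : pvFind P x = (P.insert x x, x) := by
      unfold pvFind
      rw [if_pos (by simp [hcf])]
    have hgx : P.getD x x = x := PySem.Dict.getD_of_not_contains P x hcf
    rw [hv]
    refine ⟨(pvRoot_fix hgx).symm, by rw [if_neg hc, PySem.Dict.keys_insert_of_not_contains P x hcf],
      pvDec_insert P hD le_rfl (by rw [PySem.Dict.contains_insert]; simp),
      pvFresh_root P hD hcf, ?_, ?_⟩
    · intro z
      by_cases hzx : z = x
      · subst hzx
        left
        rw [PySem.Dict.getD_insert, hgx]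
        simp
      · left
        rw [PySem.Dict.getD_insert]
        simp [hzx]
    · rw [PySem.Dict.getD_insert, pvRoot_fix hgx]
      simp

theorem pvFind_nodup (P : PySem.Dict Int Int) (x : Int) (hD : pvDec P) (hN : P.keys.Nodup) :
    (pvFind P x).1.keys.Nodup := by
  obtain ⟨_, hk, _, _, _, _⟩ := pvFind_spec P x hD
  rw [hk]
  by_cases hc : P.contains x = true
  · simpa [hc] using hN
  · have hx : x ∉ P.keys := fun hm => hc ((PySem.Dict.contains_iff_mem_keys P x).mpr hm)
    rw [if_neg hc, List.nodup_append]
    exact ⟨hN, by simp, by simp; exact fun a ha h => hx (h ▸ ha)⟩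

theorem pvGetD_irrel (d : PySem.Dict Int Int) {k : Int} (h : d.contains k = true) (d1 d2 : Int) :
    d.getD k d1 = d.getD k d2 := by
  rw [PySem.Dict.contains_eq_isSome_get?] at h
  rw [PySem.Dict.getD_eq_get?_getD, PySem.Dict.getD_eq_get?_getD]
  rcases hq : d.get? k with _ | v
  · rw [hq] at h; simp at h
  · rfl

-- the combined loop invariant: P is A's forest, L is B's flat label dict
def pvInv (P L : PySem.Dict Int Int) : Prop :=
  pvDec P ∧ P.keys.Nodup ∧ L.keys = P.keys ∧ ∀ z, L.getD z z = pvRoot P z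

theorem pvRelabel_get? (l : List (Int × Int)) (hi lo z : Int) :
    (PySem.Dict.mk (l.map (fun q => (q.1, if q.2 = hi then lo else q.2)))).get? z
      = ((PySem.Dict.mk l).get? z).map (fun v => if v = hi then lo else v) := by
  induction l with
  | nil => rfl
  | cons a l ih =>
    obtain ⟨k, v⟩ := a
    simp only [List.map_cons, PySem.Dict.get?_mk_cons]
    by_cases h : (k == z) = true
    · rw [if_pos h, if_pos h]
      rfl
    · rw [if_neg h, if_neg h]
      exact ih

theorem pvRelabel_keys (L : PySem.Dict Int Int) (hi lo : Int) :
    (pvRelabel L hi lo).keys = L.keys := by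
  show (PySem.Dict.mk (L.items.map (fun q => (q.1, if q.2 = hi then lo else q.2)))).keys = L.keys
  rw [PySem.Dict.keys_mk, List.map_map]
  rfl

theorem pvInsB (P L : PySem.Dict Int Int) (x : Int) (hD : pvDec P) (hK : L.keys = P.keys)
    (hV : ∀ z, L.getD z z = pvRoot P z) :
    (if L.contains x then L else L.insert x x).keys = (pvFind P x).1.keys ∧
    (∀ z, (if L.contains x then L else L.insert x x).getD z z = pvRoot (pvFind P x).1 z) := by
  obtain ⟨_, hk, _, hroot, _, _⟩ := pvFind_spec P x hD
  have hcc : L.contains x = P.contains x := pvContains_congr hK x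
  by_cases hc : P.contains x = true
  · rw [hcc, hc]
    simp only [if_true]
    refine ⟨by rw [hk, if_pos hc, ← hK], fun z => by rw [hroot z, hV z]⟩
  · have hcf : P.contains x = false := by simpa using hc
    rw [hcc, hcf]
    simp only [Bool.false_eq_true, if_false]
    constructor
    · rw [hk, if_neg hc, PySem.Dict.keys_insert_of_not_contains L x (by rw [hcc]; exact hcf), hK]
    · intro z
      rw [hroot z]
      by_cases hzx : z = x
      · subst hzx
        rw [PySem.Dict.getD_insert]
        simp [pvRoot_fix (PySem.Dict.getD_of_not_contains P z hcf)]
      · rw [PySem.Dict.getD_insert]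
        simp only [hzx, if_false]
        exact hV z

theorem pvStep_inv (P L : PySem.Dict Int Int) (t : Int × Int) (h : pvInv P L) :
    pvInv (pvStepA P t) (pvStepB L t) := by
  obtain ⟨hD, hN, hK, hV⟩ := h
  obtain ⟨hf1r, hf1k, hf1D, hf1root, _, _⟩ := pvFind_spec P t.1 hD
  have hN1 : (pvFind P t.1).1.keys.Nodup := pvFind_nodup P t.1 hD hN
  obtain ⟨hf2r, hf2k, hf2D, hf2root, _, _⟩ := pvFind_spec (pvFind P t.1).1 t.2 hf1D
  have hN2 : (pvFind (pvFind P t.1).1 t.2).1.keys.Nodup := pvFind_nodup _ t.2 hf1D hN1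
  set P1 := (pvFind P t.1).1 with hP1
  set P2 := (pvFind P1 t.2).1 with hP2
  -- B side: the two conditional inserts match the two finds
  obtain ⟨hbk1, hbv1⟩ := pvInsB P L t.1 hD hK hV
  set L1 := if L.contains t.1 then L else L.insert t.1 t.1 with hL1
  obtain ⟨hbk2, hbv2⟩ := pvInsB P1 L1 t.2 hf1D hbk1 hbv1
  set L2 := if L1.contains t.2 then L1 else L1.insert t.2 t.2 with hL2
  -- membership of the two endpoints and their roots in P2
  have hc1P1 : P1.contains t.1 = true := by
    rw [PySem.Dict.contains_eq_decide_mem_keys, hf1k]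
    by_cases hc : P.contains t.1 = true
    · rw [if_pos hc]
      simpa using (PySem.Dict.contains_iff_mem_keys P t.1).mp hc
    · rw [if_neg hc]
      simp
  have hc2P2 : P2.contains t.2 = true := by
    rw [PySem.Dict.contains_eq_decide_mem_keys, hf2k]
    by_cases hc : P1.contains t.2 = true
    · rw [if_pos hc]
      simpa using (PySem.Dict.contains_iff_mem_keys P1 t.2).mp hc
    · rw [if_neg hc]
      simp
  have hc1P2 : P2.contains t.1 = true := by
    rw [PySem.Dict.contains_eq_decide_mem_keys, hf2k]
    have hm1 : t.1 ∈ P1.keys := (PySem.Dict.contains_iff_mem_keys P1 t.1).mp hc1P1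
    by_cases hc : P1.contains t.2 = true
    · rw [if_pos hc]; simpa using hm1
    · rw [if_neg hc]; simp [hm1]
  -- roots
  have hr0 : (pvFind P t.1).2 = pvRoot P2 t.1 := by rw [hf1r, ← hf1root t.1, ← hf2root t.1]
  have hr1 : (pvFind P1 t.2).2 = pvRoot P2 t.2 := by rw [hf2r, ← hf2root t.2]
  have hs1 := pvRoot_spec P2 hf2D t.1
  have hs2 := pvRoot_spec P2 hf2D t.2
  set r0 := pvRoot P2 t.1 with hhr0
  set r1 := pvRoot P2 t.2 with hhr1
  have hv1 : L2.getD t.1 t.1 = r0 := hbv2 t.1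
  have hv2 : L2.getD t.2 t.2 = r1 := hbv2 t.2
  -- unfold both steps
  have hA : pvStepA P t = if r0 < r1 then P2.insert r1 r0
      else if r1 < r0 then P2.insert r0 r1 else P2 := by
    rw [pvStepA]
    rw [← hP1, ← hP2, hr0, hr1]
  have hB : pvStepB L t = if (if r0 < r1 then r0 else r1) ≠ (if r0 < r1 then r1 else r0) then
      pvRelabel L2 (if r0 < r1 then r1 else r0) (if r0 < r1 then r0 else r1) else L2 := by
    rw [pvStepB]
    rw [← hL1, ← hL2, hv1, hv2]
  rcases lt_trichotomy r0 r1 with hlt | heq | hlt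
  · -- r0 < r1 : link r1 ↦ r0, relabel r1 → r0
    have hne : r0 ≠ r1 := ne_of_lt hlt
    rw [hA, if_pos hlt, hB, if_pos hlt, if_pos hlt, if_pos (by exact hne)]
    have hlink := pvLink_root P2 hf2D (hs1.2.2 hc1P2) hs1.1 hs2.1 hlt
    refine ⟨pvDec_insert P2 hf2D (le_of_lt hlt)
        (by rw [PySem.Dict.contains_insert]; simp [hs1.2.2 hc1P2]),
      by rw [PySem.Dict.keys_insert_of_contains P2 r0 (hs2.2.2 hc2P2)]; exact hN2,
      by rw [pvRelabel_keys, hbk2, PySem.Dict.keys_insert_of_contains P2 r0 (hs2.2.2 hc2P2)],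
      ?_⟩
    intro z
    rw [hlink z]
    have hmk : PySem.Dict.mk L2.items = L2 := PySem.Dict.ext rfl
    have hget := pvRelabel_get? L2.items r1 r0 z
    rw [hmk] at hget
    rcases hq : L2.get? z with _ | v
    · have hnc : L2.contains z = false := by
        rw [PySem.Dict.contains_eq_isSome_get?, hq]; rfl
      have hgz : L2.getD z z = z := PySem.Dict.getD_of_not_contains L2 z hnc
      have hrz : pvRoot P2 z = z := by rw [← hbv2 z, hgz]
      have hzr1 : z ≠ r1 := by
        intro hzr
        have hct : L2.contains r1 = true := by
          rw [pvContains_congr hbk2]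
          exact hs2.2.2 hc2P2
        rw [← hzr, hnc] at hct
        exact Bool.false_ne_true hct
      rw [hrz, if_neg hzr1]
      have hrel : (pvRelabel L2 r1 r0).getD z z = z := by
        rw [PySem.Dict.getD_eq_get?_getD]
        show ((PySem.Dict.mk (L2.items.map _)).get? z).getD z = z
        rw [hget, hq]
        rfl
      rw [hrel]
    · have hgz : L2.getD z z = v := by rw [PySem.Dict.getD_eq_get?_getD, hq]; rfl
      have hrz : pvRoot P2 z = v := by rw [← hbv2 z, hgz]
      have hrel : (pvRelabel L2 r1 r0).getD z z = if v = r1 then r0 else v := by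
        rw [PySem.Dict.getD_eq_get?_getD]
        show ((PySem.Dict.mk (L2.items.map _)).get? z).getD z = _
        rw [hget, hq]
        rfl
      rw [hrel, hrz]
  · -- r0 = r1 : no merge on either side
    rw [hA, if_neg (by omega), if_neg (by omega), hB, if_neg (by simp [heq])]
    exact ⟨hf2D, hN2, hbk2, hbv2⟩
  · -- r1 < r0 : link r0 ↦ r1, relabel r0 → r1
    have hne : r1 ≠ r0 := ne_of_lt hlt
    have hnlt : ¬ r0 < r1 := by omega
    rw [hA, if_neg hnlt, if_pos hlt, hB, if_neg hnlt, if_neg hnlt, if_pos (by exact hne)]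
    have hlink := pvLink_root P2 hf2D (hs2.2.2 hc2P2) hs2.1 hs1.1 hlt
    refine ⟨pvDec_insert P2 hf2D (le_of_lt hlt)
        (by rw [PySem.Dict.contains_insert]; simp [hs2.2.2 hc2P2]),
      by rw [PySem.Dict.keys_insert_of_contains P2 r1 (hs1.2.2 hc1P2)]; exact hN2,
      by rw [pvRelabel_keys, hbk2, PySem.Dict.keys_insert_of_contains P2 r1 (hs1.2.2 hc1P2)],
      ?_⟩
    intro z
    rw [hlink z]
    have hmk : PySem.Dict.mk L2.items = L2 := PySem.Dict.ext rfl
    have hget := pvRelabel_get? L2.items r0 r1 z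
    rw [hmk] at hget
    rcases hq : L2.get? z with _ | v
    · have hnc : L2.contains z = false := by
        rw [PySem.Dict.contains_eq_isSome_get?, hq]; rfl
      have hgz : L2.getD z z = z := PySem.Dict.getD_of_not_contains L2 z hnc
      have hrz : pvRoot P2 z = z := by rw [← hbv2 z, hgz]
      have hzr0 : z ≠ r0 := by
        intro hzr
        have hct : L2.contains r0 = true := by
          rw [pvContains_congr hbk2]
          exact hs1.2.2 hc1P2
        rw [← hzr, hnc] at hct
        exact Bool.false_ne_true hct
      rw [hrz, if_neg hzr0]
      have hrel : (pvRelabel L2 r0 r1).getD z z = z := by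
        rw [PySem.Dict.getD_eq_get?_getD]
        show ((PySem.Dict.mk (L2.items.map _)).get? z).getD z = _
        rw [hget, hq]
        rfl
      rw [hrel]
    · have hgz : L2.getD z z = v := by rw [PySem.Dict.getD_eq_get?_getD, hq]; rfl
      have hrz : pvRoot P2 z = v := by rw [← hbv2 z, hgz]
      have hrel : (pvRelabel L2 r0 r1).getD z z = if v = r0 then r1 else v := by
        rw [PySem.Dict.getD_eq_get?_getD]
        show ((PySem.Dict.mk (L2.items.map _)).get? z).getD z = _
        rw [hget, hq]
        rfl
      rw [hrel, hrz]

theorem pvCleanup_spec : ∀ (ks : List Int) (P : PySem.Dict Int Int), pvDec P →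
    (∀ k ∈ ks, P.contains k = true) →
    (ks.foldl (fun Q k => (pvFind Q k).1) P).keys = P.keys ∧
    pvDec (ks.foldl (fun Q k => (pvFind Q k).1) P) ∧
    (∀ z, pvRoot (ks.foldl (fun Q k => (pvFind Q k).1) P) z = pvRoot P z) ∧
    (∀ z, (ks.foldl (fun Q k => (pvFind Q k).1) P).getD z z = P.getD z z ∨
          (ks.foldl (fun Q k => (pvFind Q k).1) P).getD z z = pvRoot P z) ∧
    (∀ k ∈ ks, (ks.foldl (fun Q k => (pvFind Q k).1) P).getD k k = pvRoot P k) := by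
  intro ks
  induction ks with
  | nil => exact fun P hD _ => ⟨rfl, hD, fun z => rfl, fun z => Or.inl rfl, by simp⟩
  | cons k ks ih =>
    intro P hD hks
    simp only [List.foldl_cons]
    obtain ⟨hr, hk1, hD1, hroot1, hold1, hgk⟩ := pvFind_spec P k hD
    have hck : P.contains k = true := hks k (by simp)
    have hkeys1 : (pvFind P k).1.keys = P.keys := by rw [hk1, if_pos hck]
    have hcont1 : ∀ j ∈ ks, (pvFind P k).1.contains j = true := by
      intro j hj
      rw [pvContains_congr hkeys1]
      exact hks j (by simp [hj])
    obtain ⟨hk2, hD2, hroot2, hold2, hdone2⟩ := ih (pvFind P k).1 hD1 hcont1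
    refine ⟨by rw [hk2, hkeys1], hD2, fun z => by rw [hroot2 z, hroot1 z], ?_, ?_⟩
    · intro z
      rcases hold2 z with h | h
      · rcases hold1 z with h' | h'
        · exact Or.inl (by rw [h, h'])
        · exact Or.inr (by rw [h, h'])
      · exact Or.inr (by rw [h, hroot1 z])
    · intro j hj
      rcases List.mem_cons.mp hj with rfl | hj
      · rcases hold2 j with h | h
        · rw [h]
          exact hgk
        · rw [h, hroot1 j]
      · rw [hdone2 j hj, hroot1 j]

theorem pvLoop_inv : ∀ (ts : List (Int × Int)) (P L : PySem.Dict Int Int), pvInv P L →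
    pvInv (ts.foldl pvStepA P) (ts.foldl pvStepB L) := by
  intro ts
  induction ts with
  | nil => exact fun P L h => h
  | cons t ts ih => exact fun P L h => ih _ _ (pvStep_inv P L t h)

theorem pvInv_empty : pvInv PySem.Dict.empty PySem.Dict.empty := by
  refine ⟨?_, by simp [PySem.Dict.keys_empty], rfl, ?_⟩
  · intro p hp
    simp [PySem.Dict.empty] at hp
  · intro z
    rw [PySem.Dict.getD_empty, pvRoot_fix (PySem.Dict.getD_empty z z)]

-- ===== VERDICT (by name: the statement is the Claim_ definition above) =====
theorem merge_tuples_unionfind_spec : Claim_equal_merge_tuples_unionfind := by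
  intro tuples _
  unfold Spec_merge_tuples_unionfind merge_tuples_unionfind merge_tuples_unionfind_alt
  obtain ⟨hD, hN, hK, hV⟩ := pvLoop_inv tuples PySem.Dict.empty PySem.Dict.empty pvInv_empty
  set Pf := tuples.foldl pvStepA PySem.Dict.empty with hPf
  set Lf := tuples.foldl pvStepB PySem.Dict.empty with hLf
  obtain ⟨hqk, hqD, hqroot, hqold, hqdone⟩ := pvCleanup_spec Pf.keys Pf hD
    (fun k hk => (PySem.Dict.contains_iff_mem_keys Pf k).mpr hk)
  set Q := Pf.keys.foldl (fun Q k => (pvFind Q k).1) Pf with hQ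
  show Q.items = Lf.items
  have hNQ : Q.keys.Nodup := by rw [hqk]; exact hN
  have hNL : Lf.keys.Nodup := by rw [hK]; exact hN
  rw [PySem.Dict.items_eq_map_keys Q hNQ 0, PySem.Dict.items_eq_map_keys Lf hNL 0, hqk, hK]
  apply List.map_congr_left
  intro k hk
  have hck : Pf.contains k = true := (PySem.Dict.contains_iff_mem_keys Pf k).mpr hk
  have hcq : Q.contains k = true := by rw [pvContains_congr hqk]; exact hck
  have hcl : Lf.contains k = true := by rw [pvContains_congr hK]; exact hck
  have e1 : Q.getD k 0 = Q.getD k k := pvGetD_irrel Q hcq 0 k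
  have e2 : Lf.getD k 0 = Lf.getD k k := pvGetD_irrel Lf hcl 0 k
  rw [e1, e2, hqdone k hk, hV k]
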